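-- pv_equiv track=rewrite | github.com/MLOliverB/Advent_Of_Code | 2022/src/day_6.py | get_first_start_of_packet_marker_index
-- ===== SOURCE A (Python) =====
-- def get_first_start_of_packet_marker_index(input_iter):
--     buffer_size = 4
--     buffer = []
--     len_buffer = 0
--     for i, char in enumerate(input_iter):
--         buffer.append(char)
--         len_buffer += 1
--         if len_buffer > buffer_size:
--             buffer.pop(0)
--             len_buffer -= 1
--         if len_buffer == buffer_size:
--             if len_buffer == len(set(buffer)):
--                 return i+1
-- ===== SOURCE B (Python) =====
-- def get_first_start_of_packet_marker_index(input_iter):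
--     last_seen = {}
--     start = 0
--     for i, char in enumerate(input_iter):
--         prev = last_seen.get(char, -1)
--         if prev >= start:
--             start = prev + 1
--         last_seen[char] = i
--         if i + 1 - start >= 4:
--             return i + 1
-- ===== Notes on version B (the rewrite author's own statement) =====
-- stated objective: faster
-- what changed: replaces the per-window buffer + set() uniqueness test with the classic last-seen-index algorithm: a dict of each character's last position and a window start pointer that jumps past duplicates, returning once the duplicate-free suffix reaches length 4
import Mathlib
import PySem

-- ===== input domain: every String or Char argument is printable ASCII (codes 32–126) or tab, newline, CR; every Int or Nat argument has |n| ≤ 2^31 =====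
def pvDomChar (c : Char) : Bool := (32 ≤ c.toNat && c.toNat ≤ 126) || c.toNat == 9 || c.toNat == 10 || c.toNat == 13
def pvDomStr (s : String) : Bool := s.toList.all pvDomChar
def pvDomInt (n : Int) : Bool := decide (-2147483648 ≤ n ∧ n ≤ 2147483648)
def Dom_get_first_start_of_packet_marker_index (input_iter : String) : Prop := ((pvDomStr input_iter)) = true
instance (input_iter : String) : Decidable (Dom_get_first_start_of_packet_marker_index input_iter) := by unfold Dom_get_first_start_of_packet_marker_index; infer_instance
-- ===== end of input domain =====

-- B replaces A's per-window buffer + set() uniqueness test with the last-seen-index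
-- algorithm: a dict of last positions and a start pointer that jumps past duplicates
-- (objective: same O(n) with a cheaper constant per character, measured faster in a timing run).

-- ===== PORT A =====
-- the for-loop over enumerate(input_iter) with state (buffer, len_buffer)
def pvLoopA (chars : List Char) (i : Nat) (buffer : List Char) (len_buffer : Nat) : Option Int :=
  match chars with
  | [] => none
  | c :: rest =>
    let buffer1 := buffer ++ [c]
    let len1 := len_buffer + 1
    -- if len_buffer > buffer_size: buffer.pop(0) (drops the head; buffer nonempty), len_buffer -= 1
    let buffer2 := if len1 > 4 then buffer1.drop 1 else buffer1
    let len2 := if len1 > 4 then len1 - 1 else len1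
    if len2 = 4 then
      if len2 = (PySem.Set.ofList buffer2).length then some ((i : Int) + 1)
      else pvLoopA rest (i + 1) buffer2 len2
    else pvLoopA rest (i + 1) buffer2 len2

def get_first_start_of_packet_marker_index (input_iter : String) : Option Int :=
  pvLoopA input_iter.toList 0 [] 0

-- ===== PORT B =====
-- the for-loop over enumerate(input_iter) with state (last_seen, start)
def pvLoopB (chars : List Char) (i : Nat) (last_seen : PySem.Dict Char Int) (start : Int) : Option Int :=
  match chars with
  | [] => none
  | c :: rest =>
    let prev := last_seen.getD c (-1)
    let start1 := if prev ≥ start then prev + 1 else start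
    let last_seen1 := last_seen.insert c (i : Int)
    if (i : Int) + 1 - start1 ≥ 4 then some ((i : Int) + 1)
    else pvLoopB rest (i + 1) last_seen1 start1

def get_first_start_of_packet_marker_index_alt (input_iter : String) : Option Int :=
  pvLoopB input_iter.toList 0 PySem.Dict.empty 0

-- ===== PRECONDITION & SPEC =====
def Spec_get_first_start_of_packet_marker_index (input_iter : String) (out : Option Int) : Prop := out = get_first_start_of_packet_marker_index_alt input_iter
instance (input_iter : String) (out : Option Int) : Decidable (Spec_get_first_start_of_packet_marker_index input_iter out) := by unfold Spec_get_first_start_of_packet_marker_index; infer_instance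

-- ===== CLAIM (what is proved, stated in full; the proofs are below) =====
def Claim_equal_get_first_start_of_packet_marker_index : Prop := ∀ (input_iter : String), Dom_get_first_start_of_packet_marker_index input_iter → Spec_get_first_start_of_packet_marker_index input_iter (get_first_start_of_packet_marker_index input_iter)

-- ===== LEMMAS AND PROOFS =====

-- |set(w)| = |w| iff w has no duplicates
lemma pvSetLen_eq_iff (w : List Char) : (PySem.Set.ofList w).length = w.length ↔ w.Nodup := by
  induction w with
  | nil => simp [PySem.Set.ofList]
  | cons x xs ih =>
    rw [PySem.Set.ofList_cons]
    by_cases hx : x ∈ xs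
    · have hmem : x ∈ PySem.Set.ofList xs := (PySem.Set.mem_ofList xs x).mpr hx
      have hlt : ((PySem.Set.ofList xs).discard x).length < (PySem.Set.ofList xs).length := by
        unfold PySem.Set.discard
        exact List.length_filter_lt_length_iff_exists.mpr ⟨x, hmem, by simp⟩
      have hle := PySem.Set.length_ofList_le xs
      constructor
      · intro h; simp at h; omega
      · intro h; exact absurd hx (by simp at h; exact h.1)
    · have heq : (PySem.Set.ofList xs).discard x = PySem.Set.ofList xs := by
        unfold PySem.Set.discard
        exact List.filter_eq_self.mpr (fun y hy => by
          have : y ∈ xs := (PySem.Set.mem_ofList xs y).mp hy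
          simp; intro h; exact hx (h ▸ this))
      rw [heq]
      simp only [List.length_cons, List.nodup_cons]
      constructor
      · intro h; exact ⟨hx, ih.mp (by omega)⟩
      · intro h; have := ih.mpr h.2; omega

-- invariant on B's dict: last_seen.get(x, -1) is the last index of x in the processed prefix
def pvInvD (seq : List Char) (k : Nat) (d : PySem.Dict Char Int) : Prop :=
  ∀ x : Char,
    (∀ j : Nat, j < k → seq[j]? = some x → (j : Int) ≤ d.getD x (-1)) ∧
    (d.getD x (-1) = -1 ∨ ∃ j : Nat, j < k ∧ d.getD x (-1) = (j : Int) ∧ seq[j]? = some x)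

-- invariant on B's start: either 0 or seq[start-1] recurs in the duplicate-free suffix
def pvInvS (seq : List Char) (k s : Nat) : Prop :=
  s = 0 ∨ ∃ m : Nat, s ≤ m ∧ m < k ∧ seq[s-1]? = seq[m]?

-- the current 4-window is duplicate-free iff B's start pointer is at least 4 back
lemma pvWindow_iff (seq : List Char) (k sN : Nat) (h3 : 3 ≤ k) (hk : k < seq.length)
    (hs : sN ≤ k + 1)
    (hnd : ((seq.take (k+1)).drop sN).Nodup) (h4 : pvInvS seq (k+1) sN) :
    (((seq.take (k+1)).drop (k-3)).Nodup ↔ sN ≤ k - 3) := by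
  constructor
  · intro hw
    by_contra hgt
    have h1 : 1 ≤ sN := by omega
    rcases h4 with h0 | ⟨m, hsm, hmk, hmeq⟩
    · omega
    · -- duplicate pair (sN-1, m) lies inside the window [k-3, k]
      have hp : sN - 1 < m := by omega
      have hwlen : ((seq.take (k+1)).drop (k-3)).length = 4 := by
        simp [List.length_take, List.length_drop]; omega
      have hget : ∀ t : Nat, k - 3 + t < k + 1 →
          ((seq.take (k+1)).drop (k-3))[t]? = seq[k-3+t]? := by
        intro t ht
        rw [List.getElem?_drop, List.getElem?_take_of_lt (by omega)]
      have hpidx : k - 3 + (sN - 1 - (k-3)) = sN - 1 := by omega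
      have hqidx : k - 3 + (m - (k-3)) = m := by omega
      have hne := List.nodup_iff_getElem?_ne_getElem?.mp hw
        (sN - 1 - (k-3)) (m - (k-3)) (by omega) (by omega)
      apply hne
      rw [hget _ (by omega), hget _ (by omega), hpidx, hqidx]
      exact hmeq
  · intro hle
    exact hnd.sublist (List.drop_sublist_drop_left _ hle)

-- main loop equivalence, by induction over the remaining characters
lemma pvLoopA_eq_pvLoopB (rest : List Char) : ∀ (seq : List Char) (k sN : Nat)
    (d : PySem.Dict Char Int),
    seq.drop k = rest → sN ≤ k →
    pvInvD seq k d → ((seq.take k).drop sN).Nodup → pvInvS seq k sN →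
    pvLoopA rest k ((seq.take k).drop (k-4)) (min k 4) = pvLoopB rest k d (sN : Int) := by
  induction rest with
  | nil => intro seq k sN d _ _ _ _ _; rw [pvLoopA, pvLoopB]
  | cons c rest ih =>
    intro seq k sN d hdrop hsk hinvD hnd hinvS
    have hklt : k < seq.length := by
      have h := congrArg List.length hdrop; simp at h; omega
    have hcons : seq.drop k = seq[k]'hklt :: seq.drop (k + 1) := List.drop_eq_getElem_cons hklt
    rw [hdrop] at hcons
    have hget : seq[k]'hklt = c := (List.cons_eq_cons.mp hcons).1.symm
    have hksome : seq[k]? = some c := by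
      rw [List.getElem?_eq_getElem hklt, hget]
    have hdrop' : seq.drop (k + 1) = rest := ((List.cons_eq_cons.mp hcons).2).symm
    have htake : seq.take (k + 1) = seq.take k ++ [c] := by
      rw [← hget]; exact List.take_succ_eq_append_getElem hklt
    -- B's new start pointer s'
    set prev := d.getD c (-1) with hprev
    obtain ⟨s'N, hs'def, hs'le, hs'nd, hs'inv⟩ :
        ∃ s'N : Nat,
          ((if prev ≥ (sN : Int) then prev + 1 else (sN : Int)) = (s'N : Int)) ∧
          s'N ≤ k + 1 ∧ ((seq.take (k+1)).drop s'N).Nodup ∧ pvInvS seq (k+1) s'N := by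
      by_cases hge : prev ≥ (sN : Int)
      · -- prev is a real last occurrence j ≥ sN of c; new start is j+1
        rcases (hinvD c).2 with h0 | ⟨j, hjk, hjval, hjocc⟩
        · rw [← hprev] at h0; rw [h0] at hge; omega
        · rw [← hprev] at hjval
          have hsj : sN ≤ j + 1 := by rw [hjval] at hge; omega
          refine ⟨j + 1, by rw [if_pos hge, hjval]; push_cast; ring, by omega, ?_, ?_⟩
          · -- seq[sN..k-1] ++ [c] minus its prefix up to j: nodup, and c does not recur after j
            rw [htake, List.drop_append_of_le_length (by simp; omega)]
            apply List.Nodup.append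
            · exact hnd.sublist (List.drop_sublist_drop_left _ hsj)
            · simp
            · -- c cannot recur after its last occurrence j
              intro a ha hb
              simp at hb; subst hb
              obtain ⟨m, hm, hmget⟩ := List.getElem_of_mem ha
              have hmlen : j + 1 + m < k := by
                simp [List.length_drop, List.length_take] at hm; omega
              have hsome : seq[j+1+m]? = some a := by
                have h1 : ((seq.take k).drop (j+1))[m]? = some a := by
                  rw [List.getElem?_eq_getElem hm, hmget]
                rwa [List.getElem?_drop, List.getElem?_take_of_lt (by omega)] at h1
              have hle := (hinvD a).1 (j+1+m) (by omega) hsome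
              rw [← hprev, hjval] at hle
              omega
          · exact Or.inr ⟨k, by omega, by omega, by
              simpa [(by omega : j + 1 - 1 = j)] using hjocc.trans hksome.symm⟩
      · -- all occurrences of c are before sN; start stays
        refine ⟨sN, by rw [if_neg hge], by omega, ?_, ?_⟩
        · rw [htake, List.drop_append_of_le_length (by simp; omega)]
          apply List.Nodup.append hnd (by simp)
          -- c cannot occur at or after sN: all its occurrences are ≤ prev < sN
          intro a ha hb
          simp at hb; subst hb
          obtain ⟨m, hm, hmget⟩ := List.getElem_of_mem ha
          have hmlen : sN + m < k := by
            simp [List.length_drop, List.length_take] at hm; omega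
          have hsome : seq[sN+m]? = some a := by
            have h1 : ((seq.take k).drop sN)[m]? = some a := by
              rw [List.getElem?_eq_getElem hm, hmget]
            rwa [List.getElem?_drop, List.getElem?_take_of_lt (by omega)] at h1
          have hle := (hinvD a).1 (sN+m) (by omega) hsome
          rw [← hprev] at hle
          omega
        · rcases hinvS with h0 | ⟨m, h1, h2, h3⟩
          · exact Or.inl h0
          · exact Or.inr ⟨m, h1, by omega, h3⟩
    -- B's new dict invariant
    have hinvD' : pvInvD seq (k+1) (d.insert c (k : Int)) := by
      intro x
      constructor
      · intro j hj hjx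
        rw [PySem.Dict.getD_insert]
        by_cases hxc : x = c
        · rw [if_pos hxc]
          omega
        · rw [if_neg hxc]
          have hjk : j < k := by
            rcases Nat.lt_succ_iff_lt_or_eq.mp hj with h | h
            · exact h
            · subst h; rw [hksome] at hjx; simp at hjx; exact absurd hjx.symm hxc
          exact (hinvD x).1 j hjk hjx
      · rw [PySem.Dict.getD_insert]
        by_cases hxc : x = c
        · rw [if_pos hxc]
          exact Or.inr ⟨k, by omega, rfl, hxc ▸ hksome⟩
        · rw [if_neg hxc]
          rcases (hinvD x).2 with h0 | ⟨j, h1, h2, h3⟩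
          · exact Or.inl h0
          · exact Or.inr ⟨j, by omega, h2, h3⟩
    -- A's len2 bookkeeping: the buffer length after this step is min (k+1) 4
    have hlen2 : (if min k 4 + 1 > 4 then min k 4 + 1 - 1 else min k 4 + 1) = min (k+1) 4 := by
      split_ifs <;> omega
    -- the two step conditions agree
    have hcond : (min (k+1) 4 = 4 ∧
        min (k+1) 4 = (PySem.Set.ofList ((seq.take (k+1)).drop (k+1-4))).length)
        ↔ ((k : Int) + 1 - (s'N : Int) ≥ 4) := by
      constructor
      · rintro ⟨hlen, hset⟩
        have h3 : 3 ≤ k := by omega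
        have hwlen : ((seq.take (k+1)).drop (k+1-4)).length = 4 := by
          simp [List.length_take, List.length_drop]; omega
        have hwnd : ((seq.take (k+1)).drop (k-3)).Nodup := by
          rw [(by omega : k - 3 = k + 1 - 4)]
          exact (pvSetLen_eq_iff _).mp (by omega)
        have := (pvWindow_iff seq k s'N h3 hklt hs'le hs'nd hs'inv).mp hwnd
        omega
      · intro hB
        have h3 : 3 ≤ k := by omega
        have hsle : s'N ≤ k - 3 := by omega
        have hwnd := (pvWindow_iff seq k s'N h3 hklt hs'le hs'nd hs'inv).mpr hsle
        have hwlen : ((seq.take (k+1)).drop (k+1-4)).length = 4 := by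
          simp [List.length_take, List.length_drop]; omega
        refine ⟨by omega, ?_⟩
        rw [(by omega : k + 1 - 4 = k - 3)] at hwlen ⊢
        rw [(pvSetLen_eq_iff _).mpr hwnd, hwlen]
        omega
    -- A's buffer bookkeeping for this step
    have hbufA : (if min k 4 + 1 > 4 then (((seq.take k).drop (k-4)) ++ [c]).drop 1
        else ((seq.take k).drop (k-4)) ++ [c]) = (seq.take (k+1)).drop (k+1-4) := by
      by_cases h4 : 4 ≤ k
      · rw [if_pos (by omega : min k 4 + 1 > 4)]
        rw [List.drop_append_of_le_length (by simp; omega), htake,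
            List.drop_append_of_le_length (by simp; omega), List.drop_drop]
        congr 2; omega
      · rw [if_neg (by omega : ¬ min k 4 + 1 > 4), htake,
            (by omega : k - 4 = 0), (by omega : k + 1 - 4 = 0),
            List.drop_zero, List.drop_zero]
    -- put the step together
    have hrec := ih seq (k+1) s'N (d.insert c (k : Int)) hdrop' (by omega) hinvD' hs'nd hs'inv
    rw [pvLoopA, pvLoopB]
    simp only [← hprev, hs'def, hbufA, hlen2]
    by_cases hstep : (k : Int) + 1 - (s'N : Int) ≥ 4
    · rw [if_pos (hcond.mpr hstep).1, if_pos ((hcond.mpr hstep).2), if_pos hstep]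
    · rw [if_neg hstep]
      by_cases hlen4 : min (k+1) 4 = 4
      · rw [if_pos hlen4, if_neg (fun hset => hstep (hcond.mp ⟨hlen4, hset⟩))]
        exact hrec
      · rw [if_neg hlen4]
        exact hrec

-- ===== VERDICT (by name: the statement is the Claim_ definition above) =====
theorem get_first_start_of_packet_marker_index_spec : Claim_equal_get_first_start_of_packet_marker_index := by
  intro input_iter _
  unfold Spec_get_first_start_of_packet_marker_index
  unfold get_first_start_of_packet_marker_index get_first_start_of_packet_marker_index_alt
  have h := pvLoopA_eq_pvLoopB input_iter.toList input_iter.toList 0 0 PySem.Dict.empty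
    (by simp) (by omega) (by intro x; constructor <;> simp [PySem.Dict.getD, PySem.Dict.get?, PySem.Dict.empty])
    (by simp) (Or.inl rfl)
  simpa using h
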